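-- pv_equiv track=rewrite | github.com/Tirrran/BookVerse | server.py | sample_timeline_items
-- ===== SOURCE A (Python) =====
-- from typing import Any
--
-- def overview_indices(count: int, sample_count: int, prefer_end: bool = False) -> list[int]:
--     if count <= 0:
--         return []
--
--     sample_count = max(1, min(sample_count, count))
--     if sample_count == 1:
--         return [count - 1] if prefer_end else [count // 2]
--
--     indices: list[int] = []
--     if prefer_end:
--         anchors = [
--             count - 1,
--             int((count - 1) * 0.8),
--             int((count - 1) * 0.6),
--             int((count - 1) * 0.4),
--         ]
--         for idx in anchors:
--             safe_idx = max(0, min(count - 1, idx))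
--             if safe_idx not in indices:
--                 indices.append(safe_idx)
--             if len(indices) >= sample_count:
--                 break
--         if len(indices) < sample_count:
--             for i in range(sample_count):
--                 idx = round(i * (count - 1) / max(1, sample_count - 1))
--                 if idx not in indices:
--                     indices.append(idx)
--                 if len(indices) >= sample_count:
--                     break
--         return indices
--
--     for i in range(sample_count):
--         idx = round(i * (count - 1) / max(1, sample_count - 1))
--         if idx not in indices:
--             indices.append(idx)
--
--     return indices
--
-- def sample_timeline_items(
--     items: list[dict[str, Any]],
--     count: int,
--     prefer_end: bool = False,
-- ) -> list[dict[str, Any]]: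
--     if not items:
--         return []
--     count = max(1, min(count, len(items)))
--     if len(items) <= count:
--         return items
--     indices = overview_indices(len(items), count, prefer_end=prefer_end)
--     return [items[idx] for idx in indices]
-- ===== SOURCE B (Python) =====
-- def sample_timeline_items(items, count, prefer_end=False):
--     n = len(items)
--     if n == 0:
--         return []
--     c = max(1, min(count, n))
--     if n <= c:
--         return items
--     if c == 1:
--         return [items[n - 1 if prefer_end else n // 2]]
--     even = [round(i * (n - 1) / (c - 1)) for i in range(c)]
--     if prefer_end:
--         cand = [max(0, min(n - 1, a)) for a in
--                 (n - 1, int((n - 1) * 0.8), int((n - 1) * 0.6), int((n - 1) * 0.4))] + even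
--     else:
--         cand = even
--     # delete-ahead dedup fused with the item lookup: take the next candidate,
--     # then erase every later occurrence of it from the remaining stream
--     res = []
--     k = c
--     while k != 0 and cand:
--         h = cand[0]
--         cand = [x for x in cand[1:] if x != h]
--         res.append(items[h])
--         k -= 1
--     return res
-- ===== Notes on version B (the rewrite author's own statement) =====
-- stated objective: alternative
-- what changed: B deduplicates the candidate indices with a delete-ahead pass (take the head, filter every later occurrence out of the remaining stream, fused with the items lookup) instead of A's append-if-not-already-in-result loops with early break; the invariant is 'the remaining stream contains nothing already emitted' rather than a membership test against the output.
import Mathlib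
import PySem

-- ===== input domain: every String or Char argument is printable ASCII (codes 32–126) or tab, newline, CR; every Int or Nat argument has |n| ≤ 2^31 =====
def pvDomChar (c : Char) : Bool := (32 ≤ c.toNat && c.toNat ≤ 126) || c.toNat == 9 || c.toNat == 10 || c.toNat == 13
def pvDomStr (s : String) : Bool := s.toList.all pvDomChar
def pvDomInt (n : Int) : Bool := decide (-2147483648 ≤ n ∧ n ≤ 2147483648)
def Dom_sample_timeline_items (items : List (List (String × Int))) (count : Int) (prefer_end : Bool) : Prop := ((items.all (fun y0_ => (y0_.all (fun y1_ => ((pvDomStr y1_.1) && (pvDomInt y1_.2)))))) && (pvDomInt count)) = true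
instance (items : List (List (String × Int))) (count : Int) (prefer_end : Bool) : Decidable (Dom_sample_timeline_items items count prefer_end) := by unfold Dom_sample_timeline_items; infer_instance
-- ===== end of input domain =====

-- B deduplicates the candidate indices with a delete-ahead pass (emit the head, filter its later
-- occurrences out of the remaining stream, fused with the items lookup) instead of A's
-- append-if-not-already-in-result loops with early break; objective: alternative.

-- ---- shared float model (exact IEEE-754 double semantics for the two Python float
-- expressions both programs contain: `int(n * 0.8)`-style anchors and `round(a / b)`;
-- exact for all magnitudes these programs reach inside Dom) ----

-- round-to-nearest-even integer of a/b (b > 0)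
def pvRne (a b : Nat) : Nat :=
  let q := a / b; let r := a % b
  if 2 * r < b then q else if b < 2 * r then q + 1 else if q % 2 = 0 then q else q + 1

def pvSigAt (p q : Nat) (e : Int) : Nat :=
  if 0 ≤ e then pvRne p (q * 2 ^ e.toNat) else pvRne (p * 2 ^ (-e).toNat) q

-- nearest double to p/q (p ≥ 0, q > 0), as an exact rational
def pvNearestD (p q : Nat) : ℚ :=
  if p = 0 then 0
  else
    let e0 : Int := (Nat.log2 p : Int) - (Nat.log2 q : Int) - 53
    let s0 := pvSigAt p q e0
    let se : Nat × Int :=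
      if s0 < 2 ^ 53 then (s0, e0)
      else
        let s1 := pvSigAt p q (e0 + 1)
        if s1 < 2 ^ 53 then (s1, e0 + 1) else (2 ^ 52, e0 + 2)
    (se.1 : ℚ) * (2 : ℚ) ^ se.2

-- the doubles 0.8, 0.6, 0.4 as exact rationals
def pvC08 : ℚ := (3602879701896397 : ℚ) / 4503599627370496
def pvC06 : ℚ := (5404319552844595 : ℚ) / 9007199254740992
def pvC04 : ℚ := (3602879701896397 : ℚ) / 9007199254740992

-- Python int(float(n) * c) for n ≥ 0 (truncation = floor on nonnegatives)
def pvAnchor (n : Int) (c : ℚ) : Int :=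
  let x := pvNearestD n.toNat 1 * c
  let y := pvNearestD x.num.toNat x.den
  Int.fdiv y.num y.den

-- Python round(x) (ties to even) of an exact nonnegative rational
def pvRoundQ (x : ℚ) : Int :=
  let d : Int := (x.den : Int)
  let q := Int.fdiv x.num d
  let r := x.num - q * d
  if 2 * r < d then q else if d < 2 * r then q + 1 else if q % 2 = 0 then q else q + 1

-- Python round(i * n / d) for i, n ≥ 0, d > 0 (int/int true division then round)
def pvEvenIdx (i n d : Int) : Int := pvRoundQ (pvNearestD (i * n).toNat d.toNat)

-- ===== PORT A =====

-- A's `for … : append-if-absent, break once len ≥ sc` loop shape (used for the anchor loop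
-- with f = clamp, and for the fallback evenly-spaced loop with f = the round formula)
def pvLoopB (sc : Int) (f : Int → Int) : List Int → List Int → List Int
  | [], ind => ind
  | x :: rest, ind =>
    let idx := f x
    let ind' := if ind.contains idx then ind else ind ++ [idx]
    if sc ≤ (ind'.length : Int) then ind' else pvLoopB sc f rest ind'

def overview_indices (count sample_count : Int) (prefer_end : Bool) : List Int :=
  if count ≤ 0 then []
  else
    let sc := max 1 (min sample_count count)
    if sc = 1 then (if prefer_end then [count - 1] else [PySem.Int.floordiv count 2])
    else if prefer_end then
      let anchors : List Int :=
        [count - 1, pvAnchor (count - 1) pvC08, pvAnchor (count - 1) pvC06, pvAnchor (count - 1) pvC04]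
      let ind := pvLoopB sc (fun idx => max 0 (min (count - 1) idx)) anchors []
      if (ind.length : Int) < sc then
        pvLoopB sc (fun i => pvEvenIdx i (count - 1) (max 1 (sc - 1))) (PySem.List.pyRange 0 sc 1) ind
      else ind
    else
      (PySem.List.pyRange 0 sc 1).foldl
        (fun ind i =>
          let idx := pvEvenIdx i (count - 1) (max 1 (sc - 1))
          if ind.contains idx then ind else ind ++ [idx]) []

def sample_timeline_items (items : List (List (String × Int))) (count : Int) (prefer_end : Bool) : List (List (String × Int)) :=
  if items = [] then []
  else
    let c := max 1 (min count (items.length : Int))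
    if (items.length : Int) ≤ c then items
    else
      -- indices are always in range, so the [] default of pyGetD is dead code
      (overview_indices (items.length : Int) c prefer_end).map
        (fun idx => PySem.List.pyGetD items idx [])

-- ===== PORT B =====

-- Source B's while loop: emit the head candidate's item, then filter every later occurrence
-- of that candidate out of the remaining stream; stop after k items or when the stream is empty
def pvFirstK (items : List (List (String × Int))) (k : Int) (cand : List Int)
    (res : List (List (String × Int))) : List (List (String × Int)) :=
  match cand with
  | [] => res
  | h :: rest =>
    if k = 0 then res
    else pvFirstK items (k - 1) (rest.filter (fun x => x != h)) (res ++ [PySem.List.pyGetD items h []])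
termination_by cand.length
decreasing_by simpa using Nat.lt_succ_of_le (List.length_filter_le _ _)

def sample_timeline_items_alt (items : List (List (String × Int))) (count : Int) (prefer_end : Bool) : List (List (String × Int)) :=
  let n : Int := (items.length : Int)
  if n = 0 then []
  else
    let c := max 1 (min count n)
    if n ≤ c then items
    else if c = 1 then
      [PySem.List.pyGetD items (if prefer_end then n - 1 else PySem.Int.floordiv n 2) []]
    else
      let even := (PySem.List.pyRange 0 c 1).map (fun i => pvEvenIdx i (n - 1) (c - 1))
      let cand :=
        if prefer_end then
          ([n - 1, pvAnchor (n - 1) pvC08, pvAnchor (n - 1) pvC06, pvAnchor (n - 1) pvC04].map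
            (fun a => max 0 (min (n - 1) a))) ++ even
        else even
      pvFirstK items c cand []

-- ===== PRECONDITION & SPEC =====
def Spec_sample_timeline_items (items : List (List (String × Int))) (count : Int) (prefer_end : Bool) (out : List (List (String × Int))) : Prop := out = sample_timeline_items_alt items count prefer_end
instance (items : List (List (String × Int))) (count : Int) (prefer_end : Bool) (out : List (List (String × Int))) : Decidable (Spec_sample_timeline_items items count prefer_end out) := by unfold Spec_sample_timeline_items; infer_instance

-- ===== CLAIM (what is proved, stated in full; the proofs are below) =====
def Claim_equal_sample_timeline_items : Prop := ∀ (items : List (List (String × Int))) (count : Int) (prefer_end : Bool), Dom_sample_timeline_items items count prefer_end → Spec_sample_timeline_items items count prefer_end (sample_timeline_items items count prefer_end)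

-- ===== LEMMAS AND PROOFS =====

-- proof-only intermediate: the candidate list A implicitly scans, deduplicated front-to-back
-- with an accumulator and truncated at the target length
def pvDedupTake (target : Int) : List Int → List Int → List Int
  | [], acc => acc
  | x :: rest, acc =>
    if (acc.length : Int) = target then acc
    else pvDedupTake target rest (if acc.contains x then acc else acc ++ [x])

-- a full accumulator stops pvDedupTake immediately
theorem pvDedupTake_of_full (t : Int) (l acc : List Int) (h : (acc.length : Int) = t) :
    pvDedupTake t l acc = acc := by
  cases l with
  | nil => rfl
  | cons x rest => simp [pvDedupTake, h]

-- pvDedupTake never grows past the target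
theorem pvDedupTake_len_le (t : Int) (l : List Int) :
    ∀ acc : List Int, (acc.length : Int) ≤ t → ((pvDedupTake t l acc).length : Int) ≤ t := by
  induction l with
  | nil => intro acc h; simpa [pvDedupTake] using h
  | cons x rest ih =>
    intro acc h
    by_cases hfull : (acc.length : Int) = t
    · simp [pvDedupTake, hfull]
    · have hlt : (acc.length : Int) < t := lt_of_le_of_ne h hfull
      simp only [pvDedupTake, hfull, if_false]
      apply ih
      by_cases hc : x ∈ acc <;> simp [hc] <;> omega

-- A's post-check break loop equals the pre-check dedup pass on the mapped candidates
theorem pvLoopB_eq_dedupTake (t : Int) (f : Int → Int) (l : List Int) :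
    ∀ acc : List Int, (acc.length : Int) < t →
      pvLoopB t f l acc = pvDedupTake t (l.map f) acc := by
  induction l with
  | nil => intro acc _; rfl
  | cons x rest ih =>
    intro acc hlt
    have hne : ¬ ((acc.length : Int) = t) := by omega
    simp only [pvLoopB, List.map_cons, pvDedupTake, hne, if_false]
    set ind' := if acc.contains (f x) then acc else acc ++ [f x] with hind
    have hlen : (ind'.length : Int) = acc.length ∨ (ind'.length : Int) = acc.length + 1 := by
      by_cases hc : f x ∈ acc <;> simp [hind, hc]
    by_cases hbrk : t ≤ (ind'.length : Int)
    · have hfull : (ind'.length : Int) = t := by omega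
      simp [hbrk, pvDedupTake_of_full t _ _ hfull]
    · simp only [hbrk, if_false]
      exact ih ind' (by omega)

-- A's break-free evenly-spaced loop equals the dedup pass when the candidates cannot overfill
theorem pvFoldl_eq_dedupTake (t : Int) (f : Int → Int) (l : List Int) :
    ∀ acc : List Int, (acc.length : Int) + l.length ≤ t →
      l.foldl (fun ind i => let idx := f i; if ind.contains idx then ind else ind ++ [idx]) acc
        = pvDedupTake t (l.map f) acc := by
  induction l with
  | nil => intro acc _; rfl
  | cons x rest ih =>
    intro acc h
    have hne : ¬ ((acc.length : Int) = t) := by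
      simp only [List.length_cons] at h; push_cast at h; omega
    simp only [List.foldl_cons, List.map_cons, pvDedupTake, hne, if_false]
    set ind' := if acc.contains (f x) then acc else acc ++ [f x] with hind
    have hlen : (ind'.length : Int) = acc.length ∨ (ind'.length : Int) = acc.length + 1 := by
      by_cases hc : f x ∈ acc <;> simp [hind, hc]
    apply ih
    simp only [List.length_cons] at h; push_cast at h; omega

-- dedup over a concatenation = dedup over the second list started from the first pass's result
theorem pvDedupTake_append (t : Int) (c1 : List Int) :
    ∀ (c2 acc : List Int), (acc.length : Int) ≤ t →
      pvDedupTake t (c1 ++ c2) acc = pvDedupTake t c2 (pvDedupTake t c1 acc) := by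
  induction c1 with
  | nil => intro c2 acc _; rfl
  | cons x rest ih =>
    intro c2 acc h
    by_cases hfull : (acc.length : Int) = t
    · simp [pvDedupTake, hfull, pvDedupTake_of_full t c2 acc hfull]
    · simp only [List.cons_append, pvDedupTake, hfull, if_false]
      apply ih
      by_cases hc : x ∈ acc <;> simp [hc] <;> omega

-- the index lists produced by A agree with the dedup pass once the clamp c is settled
theorem pvIndices_eq (n c : Int) (pe : Bool) (h1 : 1 ≤ c) (h2 : c < n) :
    overview_indices n c pe =
      (if c = 1 then (if pe then [n - 1] else [PySem.Int.floordiv n 2])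
       else
        let even := (PySem.List.pyRange 0 c 1).map (fun i => pvEvenIdx i (n - 1) (c - 1))
        let cand :=
          if pe then
            ([n - 1, pvAnchor (n - 1) pvC08, pvAnchor (n - 1) pvC06, pvAnchor (n - 1) pvC04].map
              (fun a => max 0 (min (n - 1) a))) ++ even
          else even
        pvDedupTake c cand []) := by
  have hn0 : ¬ (n ≤ 0) := by omega
  have hsc : max 1 (min c n) = c := by omega
  simp only [overview_indices, hsc, if_neg hn0]
  by_cases hc1 : c = 1
  · simp [hc1]
  · have hmax : max 1 (c - 1) = c - 1 := by omega
    simp only [if_neg hc1, hmax]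
    cases pe with
    | false =>
      simp only [Bool.false_eq_true, if_false]
      apply pvFoldl_eq_dedupTake
      rw [PySem.List.length_pyRange_one]
      simp only [List.length_nil]
      omega
    | true =>
      simp only [if_true]
      rw [pvLoopB_eq_dedupTake c _ _ [] (by simp; omega)]
      rw [pvDedupTake_append c _ _ [] (by simp; omega)]
      set I1 := pvDedupTake c
        ([n - 1, pvAnchor (n - 1) pvC08, pvAnchor (n - 1) pvC06, pvAnchor (n - 1) pvC04].map
          (fun a => max 0 (min (n - 1) a))) [] with hI1
      by_cases hlt : (I1.length : Int) < c
      · simp only [hlt, if_true]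
        exact pvLoopB_eq_dedupTake c _ _ I1 hlt
      · have hle : (I1.length : Int) ≤ c := by
          rw [hI1]; exact pvDedupTake_len_le c _ [] (by simp; omega)
        have hfull : (I1.length : Int) = c := by omega
        simp [hlt, pvDedupTake_of_full c _ _ hfull]

-- bridge: mapping the accumulator dedup through the item lookup equals B's delete-ahead pass
theorem pvDedupTake_map_firstK (items : List (List (String × Int))) (l : List Int) :
    ∀ (acc : List Int) (t : Int), (acc.length : Int) ≤ t →
      (pvDedupTake t l acc).map (fun i => PySem.List.pyGetD items i []) =
        pvFirstK items (t - (acc.length : Int)) (l.filter (fun x => !acc.contains x))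
          (acc.map (fun i => PySem.List.pyGetD items i [])) := by
  induction l with
  | nil => intro acc t _; cases h : acc <;> simp [pvDedupTake, pvFirstK]
  | cons x rest ih =>
    intro acc t hle
    by_cases hfull : (acc.length : Int) = t
    · rw [pvDedupTake_of_full t _ _ hfull]
      have h0 : t - (acc.length : Int) = 0 := by omega
      rw [h0]
      cases hf : (x :: rest).filter (fun x => !acc.contains x) with
      | nil => simp [pvFirstK]
      | cons y ys => simp [pvFirstK]
    · have hlt : (acc.length : Int) < t := lt_of_le_of_ne hle hfull
      simp only [pvDedupTake, hfull, if_false]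
      by_cases hx : acc.contains x
      · simp only [hx, if_true, List.filter_cons, Bool.not_eq_eq_eq_not, Bool.not_true]
        rw [ih acc t hle]
        simp [hx]
      · simp only [hx, Bool.false_eq_true, if_false]
        rw [ih (acc ++ [x]) t (by simp; omega)]
        have hk : ¬ (t - (acc.length : Int) = 0) := by omega
        simp only [List.filter_cons, hx, Bool.not_false, if_true]
        rw [show ((acc ++ [x]).length : Int) = (acc.length : Int) + 1 by simp]
        simp only [pvFirstK, hk, if_false, List.map_append, List.map_cons, List.map_nil]
        congr 1
        · omega
        · -- filter by "not in acc ++ [x]" = filter by "not in acc" then "≠ x"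
          rw [List.filter_filter]
          apply List.filter_congr
          intro y _
          by_cases hy : acc.contains y <;> by_cases hxy : y = x <;>
            simp [hy, hxy, List.contains_append]

-- ===== VERDICT (by name: the statement is the Claim_ definition above) =====
theorem sample_timeline_items_spec : Claim_equal_sample_timeline_items := by
  intro items count pe _
  unfold Spec_sample_timeline_items
  by_cases hnil : items = []
  · simp [sample_timeline_items, sample_timeline_items_alt, hnil]
  · have hlen : items.length ≠ 0 := by simpa [List.length_eq_zero_iff] using hnil
    have hn0 : ¬ ((items.length : Int) = 0) := by exact_mod_cast hlen
    set n : Int := (items.length : Int) with hn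
    set c : Int := max 1 (min count n) with hc
    by_cases hle : n ≤ c
    · simp [sample_timeline_items, sample_timeline_items_alt, hnil, hn0, ← hn, ← hc, hle]
    · have h1 : 1 ≤ c := by omega
      have h2 : c < n := by omega
      simp only [sample_timeline_items, sample_timeline_items_alt, hnil, hn0, if_false, ← hn,
        ← hc, hle]
      rw [pvIndices_eq n c pe h1 h2]
      by_cases hc1 : c = 1
      · cases pe <;> simp [hc1]
      · simp only [hc1, if_false]
        have := pvDedupTake_map_firstK items
          (if pe then
            ([n - 1, pvAnchor (n - 1) pvC08, pvAnchor (n - 1) pvC06, pvAnchor (n - 1) pvC04].map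
              (fun a => max 0 (min (n - 1) a))) ++
              ((PySem.List.pyRange 0 c 1).map (fun i => pvEvenIdx i (n - 1) (c - 1)))
           else (PySem.List.pyRange 0 c 1).map (fun i => pvEvenIdx i (n - 1) (c - 1)))
          [] c (by simp; omega)
        simp only [List.length_nil, Nat.cast_zero, sub_zero, List.contains_nil, Bool.not_false,
          List.filter_true, List.map_nil] at this
        exact this
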